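-- pv_equiv track=rewrite | github.com/cnkyrpsgl/leetcode | solutions/python3/533.py | findBlackPixel
-- ===== SOURCE A (Python) =====
-- def findBlackPixel(picture, N):
--     m, n, res = len(picture), len(picture[0]), 0
--     for row in picture:
--         r_cnt = row.count("B")
--         if r_cnt != N:
--             continue
--         for j in range(n):
--             if row[j] == "B":
--                 col_cnt = same = 0
--                 for i in range(m):
--                     if picture[i][j] == "B":
--                         col_cnt += 1
--                         if picture[i] == row:
--                             same += 1
--                         else:
--                             break
--                 if r_cnt == col_cnt == same:
--                     res += 1
--     return res
-- ===== SOURCE B (Python) =====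
-- def findBlackPixel(picture, N):
--     # One pass builds per-column B-counts and a multiplicity map of row contents;
--     # then each distinct row group contributes in O(n).
--     cols = {}
--     groups = {}
--     for row in picture:
--         key = tuple(row)
--         groups[key] = groups.get(key, 0) + 1
--         for j, v in enumerate(row):
--             if v == "B":
--                 cols[j] = cols.get(j, 0) + 1
--     res = 0
--     for key, k in groups.items():
--         if k == N and sum(v == "B" for v in key) == N:
--             res += k * sum(1 for j, v in enumerate(key) if v == "B" and cols[j] == N)
--     return res
-- ===== Notes on version B (the rewrite author's own statement) =====
-- stated objective: alternative
-- what changed: A rescans the whole column (with an early break) for every black pixel of every qualifying row; B instead makes one pass building per-column B-counts and a multiplicity map of row contents and then scores each distinct row group once, using that a pixel counts iff its column's B-count and its row's multiplicity both equal N (worst-case O(m*n) instead of O(m^2*n), though not measurably faster on the generated inputs).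
-- outside the precondition, e.g. on findBlackPixel([['B'], []], 1): A raises IndexError, B returns 1; on findBlackPixel([[], [], ['W', 'B', 'W', 'W'], ['B']], 1): A returns 0, B returns 2
import Mathlib
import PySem

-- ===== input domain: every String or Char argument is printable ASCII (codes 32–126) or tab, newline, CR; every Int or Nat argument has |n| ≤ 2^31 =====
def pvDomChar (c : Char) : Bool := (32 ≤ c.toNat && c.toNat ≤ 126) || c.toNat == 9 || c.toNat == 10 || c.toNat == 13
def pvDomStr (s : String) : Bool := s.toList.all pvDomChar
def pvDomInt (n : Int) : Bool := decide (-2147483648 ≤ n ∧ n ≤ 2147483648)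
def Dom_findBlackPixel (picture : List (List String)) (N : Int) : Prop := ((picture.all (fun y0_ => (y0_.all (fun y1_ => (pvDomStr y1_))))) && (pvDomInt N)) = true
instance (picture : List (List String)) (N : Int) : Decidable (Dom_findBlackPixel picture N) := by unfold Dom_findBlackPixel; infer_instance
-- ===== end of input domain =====

-- B replaces A's per-pixel column rescans by one pass building column B-counts and a
-- row-multiplicity map, scoring each distinct row group once (objective: alternative).

-- ===== PORT A =====
-- the inner 'for i in range(m): … break' loop of A: scans the rows of picture in order
-- (picture[i] for i in range(len(picture))), stopping at the first black pixel in column j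
-- whose row differs from `row`
def aScan (rows : List (List String)) (j : Int) (row : List String)
    (col_cnt same : Int) : Int × Int :=
  match rows with
  | [] => (col_cnt, same)
  | r :: rest =>
    -- picture[i][j] == "B" (index in range under Pre_; pyGetD is exact there)
    if PySem.List.pyGetD r j "" = "B" then
      if r = row then aScan rest j row (col_cnt + 1) (same + 1)
      else (col_cnt + 1, same)   -- break
    else aScan rest j row col_cnt same

def findBlackPixel (picture : List (List String)) (N : Int) : Int :=
  -- n = len(picture[0]); picture[0] raises IndexError on an empty picture — Pre_ excludes it
  let n : Int := PySem.List.len ((PySem.List.pyGet? picture 0).getD [])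
  picture.foldl (fun res row =>
    let r_cnt : Int := (PySem.List.count row "B" : Int)
    if r_cnt ≠ N then res
    else
      (PySem.List.pyRange 0 n 1).foldl (fun res j =>
        if PySem.List.pyGetD row j "" = "B" then
          let p := aScan picture j row 0 0
          if r_cnt = p.1 ∧ p.1 = p.2 then res + 1 else res
        else res) res) 0

-- ===== PORT B =====
-- 'for j, v in enumerate(row): if v == "B": cols[j] = cols.get(j, 0) + 1'
def bColsRow (c : PySem.Dict Int Int) (row : List String) : PySem.Dict Int Int :=
  (PySem.List.enumerate row).foldl
    (fun c p => if p.2 = "B" then c.modify p.1 0 (· + 1) else c) c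

def findBlackPixel_alt (picture : List (List String)) (N : Int) : Int :=
  let st := picture.foldl (fun st row =>
      (st.1.modify row 0 (· + 1), bColsRow st.2 row))
    (PySem.Dict.empty, PySem.Dict.empty)
  -- st.1 = groups (row contents ↦ multiplicity), st.2 = cols (column ↦ B-count)
  st.1.items.foldl (fun res kv =>
    if kv.2 = N ∧ (kv.1.map (fun v => if v = "B" then (1 : Int) else 0)).sum = N then
      -- cols[j]: the key is present whenever v == "B" here, so getD is exact
      res + kv.2 * ((PySem.List.enumerate kv.1).foldl
        (fun s p => if p.2 = "B" ∧ st.2.getD p.1 0 = N then s + 1 else s) 0)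
    else res) 0

-- ===== PRECONDITION & SPEC =====
-- Pre_ keeps the problem's natural domain: a nonempty picture that is rectangular, or whose
-- rows' B-counts all differ from N (then neither program counts anything). Excluded are the
-- empty picture, where A's picture[0] raises IndexError, and ragged pictures with a row of
-- B-count N, on which A's fixed-width indexing (row[j] / picture[i][j] for
-- j < len(picture[0])) either raises IndexError or reads an accidental subset of the columns.
def Pre_findBlackPixel (picture : List (List String)) (N : Int) : Prop :=
  picture ≠ [] ∧
    ((∀ r ∈ picture, r.length = (picture.headD []).length) ∨
     (∀ r ∈ picture, (PySem.List.count r "B" : Int) ≠ N))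
instance (picture : List (List String)) (N : Int) : Decidable (Pre_findBlackPixel picture N) := by
  unfold Pre_findBlackPixel; infer_instance

def pvWitness_findBlackPixel : List (List String) × Int := ([["B", "W"], ["W", "B"]], 1)

def Spec_findBlackPixel (picture : List (List String)) (N : Int) (out : Int) : Prop := out = findBlackPixel_alt picture N
instance (picture : List (List String)) (N : Int) (out : Int) : Decidable (Spec_findBlackPixel picture N out) := by unfold Spec_findBlackPixel; infer_instance

-- ===== CLAIM (what is proved, stated in full; the proofs are below) =====
def Claim_equal_findBlackPixel : Prop := ∀ (picture : List (List String)) (N : Int), Dom_findBlackPixel picture N → Pre_findBlackPixel picture N → Spec_findBlackPixel picture N (findBlackPixel picture N)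

-- ===== LEMMAS AND PROOFS =====

-- number of rows of `picture` whose entry in column `jn` is "B"
def colC (picture : List (List String)) (jn : Nat) : Nat :=
  picture.countP (fun r => decide (r.getD jn "" = "B"))

-- columns of `row` (among the first n) that are black and whose column B-count is N
def Fcnt (picture : List (List String)) (N : Int) (n : Nat) (row : List String) : Nat :=
  (List.range n).countP (fun jn => decide (row.getD jn "" = "B" ∧ (colC picture jn : Int) = N))

-- per-row contribution of A (and, times the row's multiplicity, of B's row groups)
def fA (picture : List (List String)) (N : Int) (n : Nat) (row : List String) : Int :=
  if (List.count "B" row : Int) = N ∧ (List.count row picture : Int) = N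
  then (Fcnt picture N n row : Int) else 0

lemma pyGetD_nonneg (r : List String) (j : Int) (h : 0 ≤ j) :
    PySem.List.pyGetD r j "" = r.getD j.toNat "" := by
  simp only [PySem.List.pyGetD, PySem.List.pyGet?_of_nonneg r h, List.getD]

lemma aScan_all (j : Int) (row : List String) :
    ∀ (rows : List (List String)) (cc s : Int),
      (∀ r ∈ rows, PySem.List.pyGetD r j "" = "B" → r = row) →
      aScan rows j row cc s
        = (cc + (rows.countP (fun r => decide (PySem.List.pyGetD r j "" = "B")) : Int),
           s + (rows.countP (fun r => decide (PySem.List.pyGetD r j "" = "B")) : Int)) := by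
  intro rows
  induction rows with
  | nil => intro cc s _; simp [aScan]
  | cons r rest ih =>
    intro cc s h
    by_cases hB : PySem.List.pyGetD r j "" = "B"
    · have hr : r = row := h r (by simp) hB
      rw [aScan, if_pos hB, if_pos hr, ih _ _ (fun r hr => h r (by simp [hr]))]
      simp [hB]
      constructor <;> ring
    · rw [aScan, if_neg hB, ih _ _ (fun r hr => h r (by simp [hr]))]
      simp [hB]

lemma aScan_bad (j : Int) (row : List String) :
    ∀ (rows : List (List String)) (cc s : Int),
      (∃ r ∈ rows, PySem.List.pyGetD r j "" = "B" ∧ r ≠ row) →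
      (aScan rows j row cc s).1 = (aScan rows j row cc s).2 + (cc - s) + 1 := by
  intro rows
  induction rows with
  | nil => intro cc s h; simp at h
  | cons r rest ih =>
    intro cc s h
    by_cases hB : PySem.List.pyGetD r j "" = "B"
    · by_cases hr : r = row
      · have h' : ∃ x ∈ rest, PySem.List.pyGetD x j "" = "B" ∧ x ≠ row := by
          rcases h with ⟨x, hx, hxB, hxne⟩
          rcases List.mem_cons.mp hx with hx | hx
          · exact absurd (hx ▸ hr) hxne
          · exact ⟨x, hx, hxB, hxne⟩
        rw [aScan, if_pos hB, if_pos hr, ih _ _ h']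
        ring
      · rw [aScan, if_pos hB, if_neg hr]; ring
    · have h' : ∃ x ∈ rest, PySem.List.pyGetD x j "" = "B" ∧ x ≠ row := by
        rcases h with ⟨x, hx, hxB, hxne⟩
        rcases List.mem_cons.mp hx with hx | hx
        · exact absurd (hx ▸ hxB) hB
        · exact ⟨x, hx, hxB, hxne⟩
      rw [aScan, if_neg hB, ih _ _ h']

lemma pixel_iff (picture : List (List String)) (N : Int) (row : List String)
    (_hrow : row ∈ picture) (jn : Nat) (hB : row.getD jn "" = "B") :
    (N = (aScan picture ((jn : Nat) : Int) row 0 0).1 ∧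
      (aScan picture ((jn : Nat) : Int) row 0 0).1 = (aScan picture ((jn : Nat) : Int) row 0 0).2)
      ↔ ((List.count row picture : Int) = N ∧ (colC picture jn : Int) = N) := by
  have hget : ∀ r : List String, PySem.List.pyGetD r ((jn : Nat) : Int) "" = r.getD jn "" := by
    intro r; rw [pyGetD_nonneg r _ (by positivity)]; simp
  by_cases hall : ∀ r ∈ picture, PySem.List.pyGetD r ((jn : Nat) : Int) "" = "B" → r = row
  · rw [aScan_all _ _ _ _ _ hall]
    have hcnt : picture.countP (fun r => decide (PySem.List.pyGetD r ((jn : Nat) : Int) "" = "B"))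
        = colC picture jn := by
      apply List.countP_congr; intro r _; simp [hget r]
    have hcc : colC picture jn = List.count row picture := by
      rw [List.count_eq_countP, colC]
      apply List.countP_congr; intro r hr
      simp only [decide_eq_true_eq, beq_iff_eq]
      constructor
      · intro h; exact hall r hr (by rw [hget r]; exact h)
      · intro h; rw [h]; exact hB
    rw [hcnt, hcc]
    constructor
    · rintro ⟨h1, -⟩; exact ⟨by omega, by omega⟩
    · rintro ⟨h1, -⟩; exact ⟨by omega, rfl⟩
  · push_neg at hall
    have hb := aScan_bad ((jn : Nat) : Int) row picture 0 0 hall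
    constructor
    · rintro ⟨h1, h2⟩; exfalso; omega
    · rintro ⟨hc, hcol⟩
      exfalso
      set p : List String → Bool := fun r => decide (r.getD jn "" = "B") with hp
      have h1 : List.count row (picture.filter p) = List.count row picture :=
        List.count_filter (by simp only [hp, decide_eq_true_eq]; exact hB)
      have h2 : colC picture jn = (picture.filter p).length := by rw [colC, List.countP_eq_length_filter]
      obtain ⟨bad, hbmem, hbB, hbne⟩ := hall
      have hbf : bad ∈ picture.filter p := by
        rw [List.mem_filter]
        refine ⟨hbmem, ?_⟩
        simp only [hp, decide_eq_true_eq]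
        rw [← hget bad]; exact hbB
      have hne : List.count row (picture.filter p) ≠ (picture.filter p).length := by
        intro h
        exact hbne ((List.count_eq_length.mp h) bad hbf).symm
      have hle := List.count_le_length (a := row) (l := picture.filter p)
      omega

lemma A_eq_sum (picture : List (List String)) (N : Int)
    (hne : picture ≠ []) :
    findBlackPixel picture N
      = (picture.map (fA picture N (picture.headD []).length)).sum := by
  have hget : ∀ (r : List String) (k : Nat), PySem.List.pyGetD r ((k : Nat) : Int) "" = r.getD k "" := by
    intro r k; rw [pyGetD_nonneg r _ (by positivity)]; simp
  rcases picture with _ | ⟨r0, rest⟩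
  · simp at hne
  set pic := r0 :: rest with hpic
  have h0 : (PySem.List.pyGet? pic 0).getD [] = r0 := by
    rw [PySem.List.pyGet?_zero]; simp [hpic]
  have hhd : pic.headD [] = r0 := rfl
  have hrange : PySem.List.pyRange 0 ((r0.length : Nat) : Int) 1 = (List.range r0.length).map (fun k => ((k : Nat) : Int)) := by
    rw [PySem.List.pyRange_one]; simp
  unfold findBlackPixel
  simp only [h0, hhd, PySem.List.len_eq, hrange]
  rw [PySem.List.foldl_congr_mem _ _ (fun res row => res + fA pic N r0.length row) _ ?_]
  · rw [PySem.List.foldl_add]; simp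
  · intro res row hrow
    by_cases hc : (PySem.List.count row "B" : Int) = N
    · rw [if_neg (by simpa using hc)]
      rw [List.foldl_map]
      have hstep : ∀ (res : Int) (k : Nat), k ∈ List.range r0.length →
          (fun (res : Int) (j : Int) =>
            if PySem.List.pyGetD row j "" = "B" then
              let p := aScan pic j row 0 0
              if (PySem.List.count row "B" : Int) = p.1 ∧ p.1 = p.2 then res + 1 else res
            else res) res ((k : Nat) : Int)
          = (if (row.getD k "" = "B" ∧ ((List.count row pic : Int) = N ∧ (colC pic k : Int) = N))
             then res + 1 else res) := by
        intro res k _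
        simp only [hget row k]
        by_cases hB : row.getD k "" = "B"
        · have hcond : ((PySem.List.count row "B" : Int) = (aScan pic ((k : Nat) : Int) row 0 0).1 ∧
              (aScan pic ((k : Nat) : Int) row 0 0).1 = (aScan pic ((k : Nat) : Int) row 0 0).2)
              ↔ ((List.count row pic : Int) = N ∧ (colC pic k : Int) = N) := by
            rw [hc]; exact pixel_iff pic N row hrow k hB
          simp only [hB, if_true, hcond]
          simp
        · simp only [hB, if_false]
          rw [if_neg (by simp [hB])]
      rw [PySem.List.foldl_congr_mem _ _
        (fun res k => if (row.getD k "" = "B" ∧ ((List.count row pic : Int) = N ∧ (colC pic k : Int) = N))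
          then res + 1 else res) _ hstep]
      rw [PySem.List.foldl_ite_add_one]
      by_cases hcnt : (List.count row pic : Int) = N
      · have : (List.range r0.length).countP
            (fun k => decide (row.getD k "" = "B" ∧ ((List.count row pic : Int) = N ∧ (colC pic k : Int) = N)))
            = Fcnt pic N r0.length row := by
          unfold Fcnt
          apply List.countP_congr; intro k _
          simp [hcnt]
        rw [this]; unfold fA; rw [PySem.List.count_eq] at hc; simp [hc, hcnt]
      · have : (List.range r0.length).countP
            (fun k => decide (row.getD k "" = "B" ∧ ((List.count row pic : Int) = N ∧ (colC pic k : Int) = N)))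
            = 0 := by
          rw [List.countP_eq_zero]; intro k _; simp [hcnt]
        rw [this]; unfold fA; simp [hcnt]
    · rw [if_pos (by simpa using hc)]
      unfold fA; rw [PySem.List.count_eq] at hc; simp [hc]

lemma fold_modify_getD (P : Int → Prop) [DecidablePred P] :
    ∀ (js : List Int) (c : PySem.Dict Int Int) (t : Int),
      ((js.foldl (fun c j => if P j then c.modify j 0 (· + 1) else c) c).getD t 0)
        = c.getD t 0 + (js.countP (fun j => decide (j = t ∧ P j)) : Int) := by
  intro js
  induction js with
  | nil => intro c t; simp
  | cons j js ih =>
    intro c t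
    rw [List.foldl_cons, ih, List.countP_cons]
    by_cases hP : P j
    · rw [if_pos hP, PySem.Dict.getD_modify]
      by_cases ht : t = j
      · simp [ht, hP]; push_cast; ring
      · have hne : ¬ (j = t ∧ P j) := fun h => ht h.1.symm
        simp [ht, hP, hne]
        exact fun h => ht h.symm
    · rw [if_neg hP]; simp [hP]

lemma countP_nodup_mem (t : Int) (P : Int → Prop) [DecidablePred P] :
    ∀ (js : List Int), js.Nodup →
      js.countP (fun j => decide (j = t ∧ P j)) = if t ∈ js ∧ P t then 1 else 0 := by
  intro js
  induction js with
  | nil => simp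
  | cons j js ih =>
    intro hnd
    rw [List.nodup_cons] at hnd
    rw [List.countP_cons, ih hnd.2]
    by_cases hj : j = t
    · subst hj
      have hnotin : j ∉ js := hnd.1
      by_cases hP : P j <;> simp [hP, hnotin]
    · by_cases ht : t ∈ js <;> by_cases hP : P t <;>
        simp [hj, ht, hP, Ne.symm hj]

lemma bColsRow_getD (c : PySem.Dict Int Int) (row : List String) (t : Int) :
    (bColsRow c row).getD t 0
      = c.getD t 0 + (if 0 ≤ t ∧ t < row.length ∧ row.getD t.toNat "" = "B" then 1 else 0) := by
  unfold bColsRow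
  rw [PySem.List.enumerate_eq_map_pyRange row "", List.foldl_map]
  have hcong : ∀ (c : PySem.Dict Int Int), ∀ j ∈ PySem.List.pyRange 0 (PySem.List.len row) 1,
      (fun (c : PySem.Dict Int Int) (j : Int) =>
        if (j, PySem.List.pyGetD row j "").2 = "B" then c.modify (j, PySem.List.pyGetD row j "").1 0 (· + 1) else c) c j
      = (fun (c : PySem.Dict Int Int) (j : Int) =>
        if PySem.List.pyGetD row j "" = "B" then c.modify j 0 (· + 1) else c) c j := by
    intro c j _; rfl
  rw [PySem.List.foldl_congr_mem _ _ _ _ hcong]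
  rw [fold_modify_getD (fun j => PySem.List.pyGetD row j "" = "B")]
  congr 1
  rw [countP_nodup_mem _ _ _ ?nd]
  case nd =>
    rw [PySem.List.len_eq, PySem.List.pyRange_one]
    exact List.nodup_range.map (fun a b h => by omega)
  rw [PySem.List.len_eq]
  by_cases h0 : 0 ≤ t
  · by_cases hlt : t < row.length
    · have hmem : t ∈ PySem.List.pyRange 0 (row.length : Int) 1 := by
        rw [PySem.List.mem_pyRange_one]; omega
      rw [pyGetD_nonneg row t h0]
      by_cases hb : row.getD t.toNat "" = "B" <;> simp [hmem, hb, h0, hlt]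
    · have hmem : t ∉ PySem.List.pyRange 0 (row.length : Int) 1 := by
        rw [PySem.List.mem_pyRange_one]; omega
      simp [hmem, hlt]
  · have hmem : t ∉ PySem.List.pyRange 0 (row.length : Int) 1 := by
      rw [PySem.List.mem_pyRange_one]; omega
    simp [hmem, h0]

lemma colsAll (jn : Nat) :
    ∀ (pics : List (List String)) (c : PySem.Dict Int Int),
      (pics.foldl bColsRow c).getD (jn : Int) 0 = c.getD (jn : Int) 0 + (colC pics jn : Int) := by
  intro pics
  induction pics with
  | nil => intro c; simp [colC]
  | cons r pics ih =>
    intro c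
    rw [List.foldl_cons, ih, bColsRow_getD]
    have : (if 0 ≤ (jn : Int) ∧ (jn : Int) < r.length ∧ r.getD ((jn : Int)).toNat "" = "B" then (1:Int) else 0)
        = (if r.getD jn "" = "B" then 1 else 0) := by
      by_cases hlt : (jn : Int) < r.length
      · simp [hlt]
      · have : r.getD jn "" = "" := by
          apply List.getD_eq_default
          omega
        simp only [List.getD] at this ⊢
        simp [hlt, this]
    rw [this]
    unfold colC
    rw [List.countP_cons]
    by_cases hb : r.getD jn "" = "B" <;> simp [hb] <;> ring

lemma sum_split (f : List String → Int) (x : List String) :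
    ∀ (xs : List (List String)),
      ((xs.map f).sum : Int)
        = (List.count x xs : Int) * f x + ((xs.filter (fun y => !(y == x))).map f).sum := by
  intro xs
  induction xs with
  | nil => simp
  | cons y ys ih =>
    by_cases hy : y = x
    · subst hy
      simp only [List.map_cons, List.sum_cons, List.count_cons_self, List.filter_cons]
      simp [ih]
      push_cast
      ring
    · simp only [List.map_cons, List.sum_cons, List.filter_cons]
      have hbeq : (y == x) = false := by simp [hy]
      simp [List.count_cons, hbeq, ih]
      ring

lemma ofList_filter (p : List String → Bool) :
    ∀ (xs : List (List String)),
      (PySem.Set.ofList xs).filter p = PySem.Set.ofList (xs.filter p) := by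
  intro xs
  induction xs using List.reverseRecOn with
  | nil => simp [PySem.Set.ofList_nil]
  | append_singleton ys y ih =>
    by_cases hp : p y
    · have hfil : List.filter p (ys ++ [y]) = List.filter p ys ++ [y] := by
        simp [List.filter_append, hp]
      rw [hfil, PySem.Set.ofList_append_singleton, PySem.Set.ofList_append_singleton,
        PySem.Set.add_eq_ite, PySem.Set.add_eq_ite]
      by_cases hmem : y ∈ PySem.Set.ofList ys
      · have hmem' : y ∈ PySem.Set.ofList (ys.filter p) := by
          rw [PySem.Set.mem_ofList] at hmem ⊢
          rw [List.mem_filter]; exact ⟨hmem, hp⟩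
        rw [if_pos hmem, if_pos hmem', ih]
      · have hmem' : y ∉ PySem.Set.ofList (ys.filter p) := by
          rw [PySem.Set.mem_ofList] at hmem ⊢
          rw [List.mem_filter]; exact fun h => hmem h.1
        rw [if_neg hmem, if_neg hmem', List.filter_append, ih]
        simp [hp]
    · have hfil : List.filter p (ys ++ [y]) = List.filter p ys := by
        simp [List.filter_append, hp]
      rw [hfil, PySem.Set.ofList_append_singleton, PySem.Set.add_eq_ite]
      by_cases hmem : y ∈ PySem.Set.ofList ys
      · rw [if_pos hmem, ih]
      · rw [if_neg hmem, List.filter_append, ih]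
        simp [hp]

lemma sum_group (f : List String → Int) :
    ∀ (n : Nat) (l : List (List String)), l.length ≤ n →
      ((PySem.Set.ofList l).map (fun k => (List.count k l : Int) * f k)).sum = (l.map f).sum := by
  intro n
  induction n with
  | zero =>
    intro l hl
    have : l = [] := List.length_eq_zero_iff.mp (Nat.le_zero.mp hl)
    subst this; simp [PySem.Set.ofList_nil]
  | succ n ih =>
    intro l hl
    match l with
    | [] => simp [PySem.Set.ofList_nil]
    | x :: xs =>
      rw [PySem.Set.ofList_cons]
      have hdis : (PySem.Set.ofList xs).discard x
          = PySem.Set.ofList (xs.filter (fun y => !(y == x))) := by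
        show (PySem.Set.ofList xs).filter (fun y => !(y == x)) = _
        exact ofList_filter _ xs
      rw [hdis]
      set l' := xs.filter (fun y => !(y == x)) with hl'
      have hlen : l'.length ≤ n := by
        have h1 : l'.length ≤ xs.length := List.length_filter_le _ _
        have h2 : xs.length ≤ n := by simpa using hl
        omega
      rw [List.map_cons, List.sum_cons]
      have hmapeq : (PySem.Set.ofList l').map (fun k => (List.count k (x :: xs) : Int) * f k)
          = (PySem.Set.ofList l').map (fun k => (List.count k l' : Int) * f k) := by
        apply List.map_congr_left
        intro k hk
        have hkne : k ≠ x := by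
          rw [PySem.Set.mem_ofList, hl', List.mem_filter] at hk
          simpa using hk.2
        have h1 : ¬ (x == k) = true := by simp; exact Ne.symm hkne
        have h2 : List.count k l' = List.count k xs := by
          rw [hl']; exact List.count_filter (by simpa using hkne)
        simp [List.count_cons, h1, h2]
      rw [hmapeq, ih l' hlen]
      rw [List.count_cons_self,
        show (List.map f (x :: xs)).sum = f x + (List.map f xs).sum by simp,
        sum_split f x xs]
      push_cast
      ring

lemma A_trivial (picture : List (List String)) (N : Int)
    (h : ∀ r ∈ picture, (PySem.List.count r "B" : Int) ≠ N) :
    findBlackPixel picture N = 0 := by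
  unfold findBlackPixel
  rw [PySem.List.foldl_congr_mem _ _ (fun res _ => res) _ ?_]
  · exact PySem.List.foldl_ignore _ _
  · intro res row hrow
    simp only []
    rw [if_pos (h row hrow)]

lemma B_eq_sum (picture : List (List String)) (N : Int) :
    findBlackPixel_alt picture N
      = ((PySem.Set.ofList picture).map
          (fun k => (List.count k picture : Int) *
            (if (List.count "B" k : Int) = N ∧ (List.count k picture : Int) = N
             then (Fcnt picture N k.length k : Int) else 0))).sum := by
  have hget : ∀ (r : List String) (k : Nat), PySem.List.pyGetD r ((k : Nat) : Int) "" = r.getD k "" := by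
    intro r k; rw [pyGetD_nonneg r _ (by positivity)]; simp
  unfold findBlackPixel_alt
  rw [PySem.List.foldl_prod_mk (f := fun (d : PySem.Dict (List String) Int) row => d.modify row 0 (· + 1))
    (g := fun (c : PySem.Dict Int Int) row => bColsRow c row)]
  set G : PySem.Dict (List String) Int :=
    picture.foldl (fun d row => d.modify row 0 (· + 1)) PySem.Dict.empty with hG
  set C : PySem.Dict Int Int := picture.foldl (fun c row => bColsRow c row) PySem.Dict.empty with hC
  have hkeys : G.keys = PySem.Set.ofList picture := by
    rw [hG, PySem.Dict.keys_foldl_modify picture 0 (fun _ _ => (· + 1)) PySem.Dict.empty]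
    rw [PySem.Dict.keys_empty, PySem.Set.update_nil_left]
  have hnod : G.keys.Nodup := by rw [hkeys]; exact PySem.Set.nodup_ofList picture
  have hitems : G.items = (PySem.Set.ofList picture).map (fun k => (k, G.getD k 0)) := by
    rw [PySem.Dict.items_eq_map_keys G hnod 0, hkeys]
  have hgetD : ∀ k, G.getD k 0 = (List.count k picture : Int) := by
    intro k
    rw [hG, PySem.Dict.getD_foldl_modify_add_one picture PySem.Dict.empty k]
    simp
  have hcols : ∀ jn : Nat, C.getD ((jn : Nat) : Int) 0 = (colC picture jn : Int) := by
    intro jn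
    rw [hC, colsAll jn picture PySem.Dict.empty]
    simp
  change (G.items.foldl (fun res kv =>
      if kv.2 = N ∧ (kv.1.map (fun v => if v = "B" then (1 : Int) else 0)).sum = N then
        res + kv.2 * ((PySem.List.enumerate kv.1).foldl
          (fun s p => if p.2 = "B" ∧ C.getD p.1 0 = N then s + 1 else s) 0)
      else res) 0) = _
  rw [hitems, List.foldl_map]
  rw [PySem.List.foldl_congr_mem _ _
    (fun res k => res + (List.count k picture : Int) *
      (if (List.count "B" k : Int) = N ∧ (List.count k picture : Int) = N
       then (Fcnt picture N k.length k : Int) else 0)) _ ?_]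
  · rw [PySem.List.foldl_add]; simp
  · intro res k hk
    rw [PySem.Set.mem_ofList] at hk
    simp only []
    rw [hgetD k]
    -- the indicator sum is the count of "B"
    have hsum : (k.map (fun v => if v = "B" then (1 : Int) else 0)).sum = (List.count "B" k : Int) := by
      rw [show (fun v : String => if v = "B" then (1 : Int) else 0)
          = (fun v : String => if (fun v : String => v == "B") v = true then (1 : Int) else 0) from
        funext fun v => by simp]
      rw [PySem.List.sum_map_ite_one_zero]
      simp [List.count_eq_countP]
    rw [hsum]
    -- the inner enumerate loop counts qualifying columns
    have hinner : ((PySem.List.enumerate k).foldl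
        (fun s p => if p.2 = "B" ∧ C.getD p.1 0 = N then s + 1 else s) 0)
        = (Fcnt picture N k.length k : Int) := by
      rw [PySem.List.enumerate_eq_map_pyRange k "", List.foldl_map]
      have hcong : ∀ (s : Int), ∀ j ∈ PySem.List.pyRange 0 (PySem.List.len k) 1,
          (fun (s : Int) (j : Int) =>
            if (j, PySem.List.pyGetD k j "").2 = "B" ∧ C.getD (j, PySem.List.pyGetD k j "").1 0 = N
            then s + 1 else s) s j
          = (fun (s : Int) (j : Int) =>
            if PySem.List.pyGetD k j "" = "B" ∧ C.getD j 0 = N then s + 1 else s) s j := by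
        intro s j _; rfl
      rw [PySem.List.foldl_congr_mem _ _ _ _ hcong]
      rw [PySem.List.len_eq, PySem.List.pyRange_one]
      simp only [Int.sub_zero, Int.toNat_natCast, List.foldl_map, zero_add]
      rw [PySem.List.foldl_ite_add_one
        (p := fun kn : Nat => PySem.List.pyGetD k ((kn : Nat) : Int) "" = "B" ∧ C.getD ((kn : Nat) : Int) 0 = N)]
      unfold Fcnt
      simp only [Int.zero_add]
      congr 1
      apply List.countP_congr
      intro kn _
      simp only [hget k kn, hcols kn, decide_eq_true_eq]
    rw [hinner]
    by_cases h1 : (List.count k picture : Int) = N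
    · by_cases h2 : (List.count "B" k : Int) = N
      · rw [if_pos ⟨h1, h2⟩, if_pos ⟨h2, h1⟩]
      · rw [if_neg (by tauto), if_neg (by tauto)]; ring
    · rw [if_neg (by tauto), if_neg (by tauto)]; ring

-- ===== VERDICT (by name: the statement is the Claim_ definition above) =====
theorem findBlackPixel_spec : Claim_equal_findBlackPixel := by
  unfold Claim_equal_findBlackPixel
  intro picture N _hdom hpre
  unfold Spec_findBlackPixel
  obtain ⟨hne, hcase⟩ := hpre
  rcases hcase with hrect | hnoq
  · rw [A_eq_sum picture N hne, B_eq_sum picture N]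
    rw [List.map_congr_left (l := PySem.Set.ofList picture)
      (g := fun k => (List.count k picture : Int) * fA picture N (picture.headD []).length k) ?_]
    · rw [sum_group _ picture.length picture le_rfl]
    · intro k hk
      rw [PySem.Set.mem_ofList] at hk
      rw [hrect k hk]
      rfl
  · rw [A_trivial picture N hnoq, B_eq_sum picture N]
    rw [List.map_congr_left (l := PySem.Set.ofList picture) (g := fun _ => (0 : Int)) ?_]
    · simp
    · intro k hk
      rw [PySem.Set.mem_ofList] at hk
      have : ¬ ((List.count "B" k : Int) = N ∧ (List.count k picture : Int) = N) := by
        intro hcon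
        exact hnoq k hk (by rw [PySem.List.count_eq]; exact hcon.1)
      rw [if_neg this]
      ring
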